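-- pv_equiv track=rewrite | github.com/kevinddchen/project-euler | src/solutions/p231.py | choose_greatest_power
-- ===== SOURCE A (Python) =====
-- def choose_greatest_power(m, n, p):
--     """Gives greatest integer c for prime p such that p^c divides choose(m, n)."""
--
--     a = max(m - n, n)
--     b = min(m - n, n)
--     carries = 0
--     i = 0
--     prev = 0
--     while p**i <= a:
--         a_digit = (a // p**i) % p
--         b_digit = (b // p**i) % p
--         if prev + a_digit + b_digit >= p:
--             carries += 1
--             prev = 1
--         else:
--             prev = 0
--         i += 1
--     return carries
-- ===== SOURCE B (Python) =====
-- def choose_greatest_power(m, n, p):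
--     """Gives greatest integer c for prime p such that p^c divides choose(m, n)."""
--     # Legendre's formula: v_p(choose(m, n)) = v_p(m!) - v_p(a!) - v_p(b!)
--     # summed term by term; no base-p digits, no carry state.
--     a = max(m - n, n)
--     b = min(m - n, n)
--     total = 0
--     pk = 1
--     while pk <= a:
--         pk *= p
--         total += m // pk - a // pk - b // pk
--     return total
-- ===== Notes on version B (the rewrite author's own statement) =====
-- stated objective: idiomatic
-- what changed: B replaces Kummer's digit-by-digit carry count (base-p digits plus a propagated carry state 'prev') with a truncated Legendre sum: each loop step adds m//p^k - a//p^k - b//p^k, with no digit extraction and no carry state.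
-- outside the precondition, e.g. on choose_greatest_power(-8, 4, -2): A returns 4, B returns 1
import Mathlib
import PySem

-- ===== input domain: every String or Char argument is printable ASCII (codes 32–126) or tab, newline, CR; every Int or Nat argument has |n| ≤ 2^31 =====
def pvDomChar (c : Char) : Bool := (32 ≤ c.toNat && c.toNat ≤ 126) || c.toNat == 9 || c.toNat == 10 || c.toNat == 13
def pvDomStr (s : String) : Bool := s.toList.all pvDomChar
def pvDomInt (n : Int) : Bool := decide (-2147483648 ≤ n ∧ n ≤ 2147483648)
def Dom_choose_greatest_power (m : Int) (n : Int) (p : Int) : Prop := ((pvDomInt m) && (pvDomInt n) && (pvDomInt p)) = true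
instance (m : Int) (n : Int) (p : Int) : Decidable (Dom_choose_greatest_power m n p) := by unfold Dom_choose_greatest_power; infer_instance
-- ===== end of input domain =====

-- B replaces A's Kummer digit-by-digit carry count with a truncated Legendre sum
-- (each step adds m//p^k - a//p^k - b//p^k); same loop count, no digit/carry state.


-- ===== PORT A =====
-- A's while loop; the fuel argument only makes the (possibly non-terminating
-- for p ∈ {-1, 0, 1}) Python loop total in Lean, it changes no admitted value.
def cgpLoopA (p a b : Int) : Nat → Nat → Int → Int → Int
  | 0, _, _, carries => carries
  | fuel+1, i, prev, carries =>
    if p ^ i ≤ a then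
      let a_digit := PySem.Int.mod (PySem.Int.floordiv a (p ^ i)) p
      let b_digit := PySem.Int.mod (PySem.Int.floordiv b (p ^ i)) p
      if p ≤ prev + a_digit + b_digit then cgpLoopA p a b fuel (i+1) 1 (carries+1)
      else cgpLoopA p a b fuel (i+1) 0 carries
    else carries

def choose_greatest_power (m : Int) (n : Int) (p : Int) : Int :=
  let a := max (m - n) n
  let b := min (m - n) n
  cgpLoopA p a b (a.toNat + 2) 0 0 0

-- ===== PORT B =====
-- B's while loop (truncated Legendre sum), same fuel convention.
def cgpLoopB (p a b m : Int) : Nat → Int → Int → Int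
  | 0, _, total => total
  | fuel+1, pk, total =>
    if pk ≤ a then
      cgpLoopB p a b m fuel (pk * p)
        (total + (PySem.Int.floordiv m (pk * p) - PySem.Int.floordiv a (pk * p)
                  - PySem.Int.floordiv b (pk * p)))
    else total

def choose_greatest_power_alt (m : Int) (n : Int) (p : Int) : Int :=
  let a := max (m - n) n
  let b := min (m - n) n
  cgpLoopB p a b m (a.toNat + 2) 1 0

-- ===== PRECONDITION & SPEC =====
-- Pre_ excludes p ≤ -2 with max(m-n,n) ≥ 1, where A returns an artefact of reading
-- base-p digits of a negative base (p is never a prime there) and B differs; and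
-- p ∈ {-1, 0, 1} with max(m-n,n) ≥ 1, where A raises ZeroDivisionError or loops forever.
def Pre_choose_greatest_power (m : Int) (n : Int) (p : Int) : Prop :=
  2 ≤ p ∨ (m - n ≤ 0 ∧ n ≤ 0)
instance (m : Int) (n : Int) (p : Int) : Decidable (Pre_choose_greatest_power m n p) := by unfold Pre_choose_greatest_power; infer_instance

def pvWitness_choose_greatest_power : Int × Int × Int := (10, 3, 2)

def Spec_choose_greatest_power (m : Int) (n : Int) (p : Int) (out : Int) : Prop := out = choose_greatest_power_alt m n p
instance (m : Int) (n : Int) (p : Int) (out : Int) : Decidable (Spec_choose_greatest_power m n p out) := by unfold Spec_choose_greatest_power; infer_instance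

-- ===== CLAIM (what is proved, stated in full; the proofs are below) =====
def Claim_equal_choose_greatest_power : Prop := ∀ (m : Int) (n : Int) (p : Int), Dom_choose_greatest_power m n p → Pre_choose_greatest_power m n p → Spec_choose_greatest_power m n p (choose_greatest_power m n p)

-- ===== LEMMAS AND PROOFS =====

-- carry-in indicator at loop index i: 1 iff adding the low i base-p digits of a and b carries out
def cgpCin (p a b : Int) (i : Nat) : Int :=
  if p ^ i ≤ a % p ^ i + b % p ^ i then 1 else 0

-- split x mod (d*q) into the next base digit and the low part
lemma emod_mul_split (x d q : Int) (hd : 0 < d) (hq : 0 < q) :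
    x % (d * q) = d * (x / d % q) + x % d := by
  have hk : x = (d * q) * ((x / d) / q) + (d * (x / d % q) + x % d) := by
    have h1 := Int.ediv_add_emod x d
    have h2 := Int.ediv_add_emod (x / d) q
    nlinarith [h1, h2]
  have hb1 : 0 ≤ d * (x / d % q) + x % d := by
    have := Int.emod_nonneg (x / d) (by omega : q ≠ 0)
    have := Int.emod_nonneg x (by omega : d ≠ 0)
    positivity
  have hb2 : d * (x / d % q) + x % d < d * q := by
    have h3 : x / d % q ≤ q - 1 := by have := Int.emod_lt_of_pos (x / d) hq; omega
    have h4 : x % d < d := Int.emod_lt_of_pos x hd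
    nlinarith
  calc x % (d * q) = ((d * q) * ((x / d) / q) + (d * (x / d % q) + x % d)) % (d * q) := by
        rw [← hk]
    _ = (d * (x / d % q) + x % d) % (d * q) := by
        rw [add_comm, Int.add_mul_emod_self_left]
    _ = d * (x / d % q) + x % d := Int.emod_eq_of_lt hb1 hb2

-- the carry-out test on digits equals the carry test on residues mod d*p
lemma carry_step (d p ad bd ra rb : Int) (hd : 0 < d) (hp : 2 ≤ p)
    (ha : 0 ≤ ad) (ha' : ad < p) (hb : 0 ≤ bd) (hb' : bd < p)
    (hra : 0 ≤ ra) (hra' : ra < d) (hrb : 0 ≤ rb) (hrb' : rb < d) :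
    (d * p ≤ (d * ad + ra) + (d * bd + rb)) ↔
      p ≤ (if d ≤ ra + rb then 1 else 0) + ad + bd := by
  split_ifs with h
  · constructor
    · intro hx
      by_contra hc
      push_neg at hc
      nlinarith
    · intro hx; nlinarith
  · push_neg at h
    constructor
    · intro hx
      by_contra hc
      push_neg at hc
      nlinarith
    · intro hx; nlinarith

-- one Legendre term is exactly the 0/1 carry-out indicator
lemma legendre_term (a b P : Int) (hP : 0 < P) :
    (a + b) / P - a / P - b / P = if P ≤ a % P + b % P then 1 else 0 := by
  have ha := Int.ediv_add_emod a P
  have hb := Int.ediv_add_emod b P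
  have hsum : a + b = (a % P + b % P) + P * (a / P + b / P) := by ring_nf; omega
  have h1 : (a + b) / P = (a % P + b % P) / P + (a / P + b / P) := by
    rw [hsum, Int.add_mul_ediv_left _ _ (by omega : P ≠ 0)]
  have hra := Int.emod_nonneg a (by omega : P ≠ 0)
  have hra' := Int.emod_lt_of_pos a hP
  have hrb := Int.emod_nonneg b (by omega : P ≠ 0)
  have hrb' := Int.emod_lt_of_pos b hP
  rw [h1]
  split_ifs with h
  · have : (a % P + b % P) / P = 1 := by
      have hx : a % P + b % P = (a % P + b % P - P) + P * 1 := by ring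
      rw [hx, Int.add_mul_ediv_left _ _ (by omega : P ≠ 0),
          Int.ediv_eq_zero_of_lt (by omega) (by omega)]
      omega
    omega
  · have : (a % P + b % P) / P = 0 := Int.ediv_eq_zero_of_lt (by omega) (by omega)
    omega

-- the two loops advance in lockstep: A's (prev, carries) state is B's (pk, total) state
lemma cgp_lockstep (p a b : Int) (hp : 2 ≤ p) :
    ∀ (fuel i : Nat) (tot : Int),
      cgpLoopA p a b fuel i (cgpCin p a b i) tot = cgpLoopB p a b (a + b) fuel (p ^ i) tot := by
  intro fuel
  induction fuel with
  | zero => intro i tot; rfl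
  | succ fuel ih =>
    intro i tot
    show (if p ^ i ≤ a then _ else _) = (if p ^ i ≤ a then _ else _)
    by_cases hg : p ^ i ≤ a
    · simp only [hg, if_pos]
      have hd : (0:Int) < p ^ i := pow_pos (by omega) i
      have hdp : (0:Int) < p ^ i * p := by positivity
      -- digits and residues
      have hsplit_a := emod_mul_split a (p ^ i) p hd (by omega)
      have hsplit_b := emod_mul_split b (p ^ i) p hd (by omega)
      have hcond : (p ≤ cgpCin p a b i + PySem.Int.mod (PySem.Int.floordiv a (p ^ i)) p
                        + PySem.Int.mod (PySem.Int.floordiv b (p ^ i)) p)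
          ↔ p ^ (i+1) ≤ a % p ^ (i+1) + b % p ^ (i+1) := by
        rw [PySem.Int.mod_eq_emod_of_pos (by omega : (0:Int) < p),
            PySem.Int.mod_eq_emod_of_pos (by omega : (0:Int) < p),
            PySem.Int.floordiv_eq_ediv_of_pos hd, PySem.Int.floordiv_eq_ediv_of_pos hd,
            pow_succ, hsplit_a, hsplit_b]
        rw [cgpCin]
        have := carry_step (p ^ i) p (a / p ^ i % p) (b / p ^ i % p) (a % p ^ i) (b % p ^ i)
          hd hp
          (Int.emod_nonneg _ (by omega)) (Int.emod_lt_of_pos _ (by omega))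
          (Int.emod_nonneg _ (by omega)) (Int.emod_lt_of_pos _ (by omega))
          (Int.emod_nonneg _ (by omega)) (Int.emod_lt_of_pos _ hd)
          (Int.emod_nonneg _ (by omega)) (Int.emod_lt_of_pos _ hd)
        rw [this]
      have hterm : PySem.Int.floordiv (a + b) (p ^ i * p) - PySem.Int.floordiv a (p ^ i * p)
            - PySem.Int.floordiv b (p ^ i * p)
          = if p ^ (i+1) ≤ a % p ^ (i+1) + b % p ^ (i+1) then 1 else 0 := by
        rw [PySem.Int.floordiv_eq_ediv_of_pos hdp, PySem.Int.floordiv_eq_ediv_of_pos hdp,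
            PySem.Int.floordiv_eq_ediv_of_pos hdp, ← pow_succ,
            legendre_term a b (p ^ (i+1)) (by positivity)]
      by_cases hc : p ^ (i+1) ≤ a % p ^ (i+1) + b % p ^ (i+1)
      · rw [if_pos (hcond.mpr hc), hterm, if_pos hc]
        have hcin : cgpCin p a b (i+1) = 1 := by rw [cgpCin, if_pos hc]
        have h3 := ih (i+1) (tot+1)
        rw [hcin, pow_succ] at h3
        exact h3
      · rw [if_neg (fun hx => hc (hcond.mp hx)), hterm, if_neg hc, add_zero]
        have hcin : cgpCin p a b (i+1) = 0 := by rw [cgpCin, if_neg hc]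
        have h3 := ih (i+1) tot
        rw [hcin, pow_succ] at h3
        exact h3
    · simp only [hg, if_false]

-- ===== VERDICT (by name: the statement is the Claim_ definition above) =====
theorem choose_greatest_power_spec : Claim_equal_choose_greatest_power := by
  intro m n p _ hpre
  show choose_greatest_power m n p = choose_greatest_power_alt m n p
  unfold choose_greatest_power choose_greatest_power_alt
  by_cases hp : 2 ≤ p
  · have hm : max (m - n) n + min (m - n) n = m := by
      rcases max_cases (m - n) n with ⟨h1, h2⟩ | ⟨h1, h2⟩ <;>
        rcases min_cases (m - n) n with ⟨h3, h4⟩ | ⟨h3, h4⟩ <;> omega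
    have h0 : cgpCin p (max (m - n) n) (min (m - n) n) 0 = 0 := by
      simp [cgpCin]
    calc cgpLoopA p (max (m - n) n) (min (m - n) n) ((max (m - n) n).toNat + 2) 0 0 0
        = cgpLoopA p (max (m - n) n) (min (m - n) n) ((max (m - n) n).toNat + 2) 0
            (cgpCin p (max (m - n) n) (min (m - n) n) 0) 0 := by rw [h0]
      _ = cgpLoopB p (max (m - n) n) (min (m - n) n) (max (m - n) n + min (m - n) n)
            ((max (m - n) n).toNat + 2) (p ^ 0) 0 :=
          cgp_lockstep p (max (m - n) n) (min (m - n) n) hp _ 0 0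
      _ = cgpLoopB p (max (m - n) n) (min (m - n) n) m ((max (m - n) n).toNat + 2) 1 0 := by
          rw [hm, pow_zero]
  · have ha : max (m - n) n ≤ 0 := by
      rcases hpre with h | ⟨h1, h2⟩
      · omega
      · exact max_le h1 h2
    have h1 : ¬ (p ^ (0:Nat) ≤ max (m - n) n) := by rw [pow_zero]; omega
    have h2 : ¬ ((1:Int) ≤ max (m - n) n) := by omega
    simp only [Int.toNat_of_nonpos ha]
    show cgpLoopA p _ _ 2 0 0 0 = cgpLoopB p _ _ m 2 1 0
    rw [cgpLoopA, if_neg h1, cgpLoopB, if_neg h2]
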